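-- pv_equiv track=rewrite | github.com/jonathan-ek/advent-of-code-2023 | day_13_2.py | row_mirror_1
-- ===== SOURCE A (Python) =====
-- def row_mirror_1(drawing):
--     res = []
--     if drawing[0] in drawing[1:]:
--         tmp1 = [i for i, ltr in enumerate(drawing) if ltr == drawing[0] and i != 0]
--         for i in tmp1:
--             if i % 2 == 0:
--                 continue
--             found = True
--             for j in range(int(i / 2) + 1):
--                 if drawing[j] != drawing[i - j]:
--                     found = False
--                     break
--             if found:
--                 res.append(int(i / 2) + 1)
--     return res
-- ===== SOURCE B (Python) =====
-- def row_mirror_1(drawing):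
--     n = len(drawing)
--     return [k for k in range(1, n // 2 + 1)
--             if drawing[:2 * k] == drawing[:2 * k][::-1]]
-- ===== Notes on version B (the rewrite author's own statement) =====
-- stated objective: simpler
-- what changed: Replaces A's scan for positions equal to drawing[0] followed by a hand-rolled half-by-half comparison loop with a single comprehension over candidate half-lengths k that tests prefix == reversed prefix.
import Mathlib
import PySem

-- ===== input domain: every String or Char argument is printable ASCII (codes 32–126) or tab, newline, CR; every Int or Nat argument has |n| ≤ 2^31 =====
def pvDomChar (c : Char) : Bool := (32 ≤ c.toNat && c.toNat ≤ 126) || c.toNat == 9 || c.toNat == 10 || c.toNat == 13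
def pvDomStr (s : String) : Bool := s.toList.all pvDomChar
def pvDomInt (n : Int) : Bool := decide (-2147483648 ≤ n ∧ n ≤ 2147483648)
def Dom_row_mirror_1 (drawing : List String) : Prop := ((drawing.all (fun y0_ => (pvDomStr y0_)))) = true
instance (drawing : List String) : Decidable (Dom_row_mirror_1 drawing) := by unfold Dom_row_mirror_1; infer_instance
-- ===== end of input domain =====

-- B replaces A's position scan + hand-rolled half-comparison loop by one comprehension over
-- half-lengths k testing prefix == reversed prefix (objective: simpler; same asymptotic cost).

-- ===== PORT A =====
def row_mirror_1 (drawing : List String) : List Int :=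
  let res : List Int := []
  if (PySem.List.slice drawing (some 1) none).contains (PySem.List.pyGetD drawing 0 "") then
    let tmp1 : List Int :=
      ((PySem.List.enumerate drawing 0).filter
        (fun p => p.2 == PySem.List.pyGetD drawing 0 "" && p.1 != 0)).map (fun p => p.1)
    tmp1.foldl (fun res i =>
      if PySem.Int.mod i 2 == 0 then res
      else
        let found := (PySem.List.pyRange 0 (PySem.Int.truncdiv i 2 + 1) 1).foldl
          (fun found j =>
            if PySem.List.pyGetD drawing j "" != PySem.List.pyGetD drawing (i - j) "" then false
            else found) true
        if found then res ++ [PySem.Int.truncdiv i 2 + 1] else res) res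
  else res

-- ===== PORT B =====
def row_mirror_1_alt (drawing : List String) : List Int :=
  List.map (fun (k : Nat) => (k : Int))
    ((List.range' 1 (drawing.length / 2)).filter
      (fun k => drawing.take (2 * k) == (drawing.take (2 * k)).reverse))

-- ===== PRECONDITION & SPEC =====
-- Pre_ excludes only the empty list, on which Python A raises IndexError at drawing[0].
def Pre_row_mirror_1 (drawing : List String) : Prop := drawing ≠ []
instance (drawing : List String) : Decidable (Pre_row_mirror_1 drawing) := by unfold Pre_row_mirror_1; infer_instance
def pvWitness_row_mirror_1 : List String := ["a", "a", "a"]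

def Spec_row_mirror_1 (drawing : List String) (out : List Int) : Prop := out = row_mirror_1_alt drawing
instance (drawing : List String) (out : List Int) : Decidable (Spec_row_mirror_1 drawing out) := by unfold Spec_row_mirror_1; infer_instance

-- ===== CLAIM (what is proved, stated in full; the proofs are below) =====
def Claim_equal_row_mirror_1 : Prop := ∀ (drawing : List String), Dom_row_mirror_1 drawing → Pre_row_mirror_1 drawing → Spec_row_mirror_1 drawing (row_mirror_1 drawing)

-- ===== LEMMAS AND PROOFS =====

-- Nat-level inner palindrome check of A (the loop over j in range(i//2+1)).
def innerOK (drawing : List String) (i : Nat) : Bool :=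
  (List.range (i / 2 + 1)).all (fun j => drawing.getD j "" == drawing.getD (i - j) "")

-- A's result in closed form over Nat indices.
lemma rowA_normal (drawing : List String) :
    row_mirror_1 drawing =
      if drawing.tail.contains (drawing.getD 0 "") then
        ((List.range drawing.length).filter
          (fun i => decide (i % 2 = 1) && innerOK drawing i
                    && (drawing.getD i "" == drawing.getD 0 "" && i != 0))).map
          (fun i => ((i / 2 + 1 : Nat) : Int))
      else [] := by
  unfold row_mirror_1
  simp only [PySem.List.slice_from_one, PySem.List.pyGetD_zero]
  by_cases hc : drawing.tail.contains (drawing.getD 0 "") = true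
  swap
  · simp only [if_neg hc]
  simp only [if_pos hc]
  rw [PySem.List.enumerate_eq_map_pyRange (d := "")]
  simp only [PySem.List.len_eq]
  rw [PySem.List.pyRange_zero_natCast]
  simp only [List.filter_map, List.map_map, List.foldl_map, Function.comp]
  rw [List.filter_congr (l := List.range drawing.length)
    (q := fun k => (drawing.getD k "" == drawing.getD 0 "" && k != 0)) (by
      intro k hk
      have hb : ((k : Int) != 0) = (k != 0) := by
        cases hk0 : (k == 0) <;> simp_all [bne]
      simp [PySem.List.pyGetD_natCast, hb])]
  have hfun : ∀ (acc : List Int) (k : Nat),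
      k ∈ (List.range drawing.length).filter (fun k => (drawing.getD k "" == drawing.getD 0 "" && k != 0)) →
      (fun x (y : Nat) =>
          if (PySem.Int.mod (y : Int) 2 == 0) = true then x
          else
            if List.foldl (fun found j =>
                  if (PySem.List.pyGetD drawing j "" != PySem.List.pyGetD drawing ((y : Int) - j) "") = true then false
                  else found) true (PySem.List.pyRange 0 (PySem.Int.truncdiv (y : Int) 2 + 1)) = true then
              x ++ [PySem.Int.truncdiv (y : Int) 2 + 1]
            else x) acc k
      = (fun res k => if decide (k % 2 = 1) && innerOK drawing k then res ++ [((k / 2 + 1 : Nat) : Int)] else res) acc k := by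
    intro acc k hk
    simp only []
    by_cases hodd : k % 2 = 1
    · have hm : PySem.Int.mod (k : Int) 2 = ((k % 2 : Nat) : Int) := by
        exact_mod_cast PySem.Int.mod_natCast k 2
      have htd : PySem.Int.truncdiv (k : Int) 2 = ((k / 2 : Nat) : Int) := by
        simp [PySem.Int.truncdiv]
      rw [hm, htd, hodd]
      have hcast : ((k / 2 : Nat) : Int) + 1 = (((k / 2 + 1 : Nat)) : Int) := by push_cast; ring
      rw [hcast, PySem.List.pyRange_zero_natCast, List.foldl_map]
      rw [PySem.List.foldl_if_false_eq]
      have hany : ((List.range (k / 2 + 1)).any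
          (fun j => (PySem.List.pyGetD drawing (j : Int) "" != PySem.List.pyGetD drawing ((k : Int) - (j : Int)) ""))) = !(innerOK drawing k) := by
        rw [PySem.List.any_congr_mem (g := fun j => !(drawing.getD j "" == drawing.getD (k - j) "")) (by
          intro j hj
          have hjk : j ≤ k := by
            have := List.mem_range.mp hj; omega
          rw [show ((k : Int) - (j : Int)) = ((k - j : Nat) : Int) from by push_cast [hjk]; ring]
          simp [PySem.List.pyGetD_natCast, bne])]
        simp [innerOK, List.all_eq_not_any_not]
      rw [hany]
      simp
    · have hm : PySem.Int.mod (k : Int) 2 = ((k % 2 : Nat) : Int) := by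
        exact_mod_cast PySem.Int.mod_natCast k 2
      have h0 : k % 2 = 0 := by omega
      rw [hm, h0]
      simp
  refine Eq.trans (PySem.List.foldl_congr_mem _ _ _ _ hfun) ?_
  rw [PySem.List.foldl_append_if]
  rw [List.filter_filter]
  simp only [List.nil_append]

-- palindromic prefix of length 2k ↔ half-comparison
lemma pal_iff (l : List String) (k : Nat) (h : 2 * k ≤ l.length) :
    l.take (2 * k) = (l.take (2 * k)).reverse ↔
      ∀ j < k, l.getD j "" = l.getD (2 * k - 1 - j) "" := by
  have hlen : (l.take (2*k)).length = 2*k := by simp; omega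
  have hget : ∀ j (hj : j < 2*k), (l.take (2*k))[j]'(by omega) = l.getD j "" := by
    intro j hj
    rw [List.getElem_take, List.getD_eq_getElem l "" (by omega)]
  constructor
  · intro he j hj
    have := congrArg (fun t => t[j]?) he
    simp only [List.getElem?_reverse (by omega : j < (l.take (2*k)).length)] at this
    rw [List.getElem?_eq_getElem (by omega), List.getElem?_eq_getElem (by omega)] at this
    have h2 := hget j (by omega)
    have h3 := hget ((l.take (2*k)).length - 1 - j) (by omega)
    rw [h2, h3] at this
    simpa [hlen] using Option.some_injective _ this
  · intro hh
    apply List.ext_getElem (by simp)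
    intro j hj1 hj2
    rw [List.getElem_reverse]
    by_cases hjk : j < k
    · rw [hget j (by omega), hget ((l.take (2*k)).length - 1 - j) (by omega)]
      simpa [hlen] using hh j hjk
    · rw [hget j (by omega), hget ((l.take (2*k)).length - 1 - j) (by omega), hlen]
      have := hh (2*k - 1 - j) (by omega)
      rw [show 2*k - 1 - (2*k - 1 - j) = j from by omega] at this
      exact this.symm

-- odd-index decomposition of a filtered range
lemma range_filter_odd (n : Nat) (Q : Nat → Bool) :
    (List.range n).filter (fun i => !(i % 2 == 0) && Q i) =
      ((List.range' 1 (n / 2)).map (fun k => 2 * k - 1)).filter Q := by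
  induction n with
  | zero => simp
  | succ n ih =>
    rw [List.range_succ, List.filter_append, ih]
    by_cases hn : n % 2 = 0
    · have h2 : (n+1)/2 = n/2 := by omega
      simp [h2, hn]
    · have h2 : (n+1)/2 = n/2 + 1 := by omega
      have h3 : List.range' 1 (n/2 + 1) = List.range' 1 (n/2) ++ [1 + 1 * (n/2)] := by
        exact List.range'_concat
      have h4 : 2 * (1 + 1 * (n/2)) - 1 = n := by omega
      have h5 : (n % 2 == 0) = false := by simp [hn]
      simp only [h2, h3, List.map_append, List.map_cons, List.map_nil, List.filter_append]
      rw [h4]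
      simp [List.filter_singleton, h5]

-- A's per-candidate test at odd index 2k-1 coincides with B's prefix-palindrome test.
lemma cond_eq (drawing : List String) (k : Nat) (h1 : 1 ≤ k) (h2 : 2 * k ≤ drawing.length) :
    (innerOK drawing (2*k-1) && (drawing.getD (2*k-1) "" == drawing.getD 0 "" && (2*k-1 : Nat) != 0))
      = (drawing.take (2*k) == (drawing.take (2*k)).reverse) := by
  have hio : innerOK drawing (2*k-1) = true ↔
      ∀ j < k, drawing.getD j "" = drawing.getD (2*k-1-j) "" := by
    have hk2 : (2*k-1)/2+1 = k := by omega
    unfold innerOK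
    rw [hk2]
    simp [List.all_eq_true, List.mem_range]
  by_cases hp : drawing.take (2*k) = (drawing.take (2*k)).reverse
  · have hall := (pal_iff drawing k h2).mp hp
    have hin : innerOK drawing (2*k-1) = true := hio.mpr hall
    have hd : drawing.getD (2*k-1) "" = drawing.getD 0 "" := by
      have := hall 0 (by omega)
      rw [show 2*k-1-0 = 2*k-1 from by omega] at this
      exact this.symm
    have hne : ((2*k-1 : Nat) != 0) = true := by simp; omega
    rw [hin, hd, hne]
    simp only [beq_self_eq_true, Bool.and_self]
    exact ((beq_iff_eq).mpr hp).symm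
  · have hin : innerOK drawing (2*k-1) = false := by
      cases hi : innerOK drawing (2*k-1)
      · rfl
      · exact absurd ((pal_iff drawing k h2).mpr (hio.mp hi)) hp
    simp [hin, hp]

-- a palindromic even prefix forces drawing[0] to reappear in the tail
lemma mem_tail_of_pal (drawing : List String) (k : Nat) (h1 : 1 ≤ k) (h2 : 2 * k ≤ drawing.length)
    (hp : drawing.take (2*k) = (drawing.take (2*k)).reverse) :
    drawing.getD 0 "" ∈ drawing.tail := by
  have hall := (pal_iff drawing k h2).mp hp
  have hd := hall 0 (by omega)
  rw [show 2*k-1-0 = 2*k-1 from by omega] at hd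
  have hlt : 2*k-1-1 < drawing.tail.length := by
    rw [List.length_tail]; omega
  have : drawing.tail[2*k-1-1] = drawing.getD (2*k-1) "" := by
    rw [List.getElem_tail, List.getD_eq_getElem drawing "" (by omega)]
    congr 1
    omega
  rw [hd, ← this]
  exact List.getElem_mem hlt

lemma main_eq (drawing : List String) :
    row_mirror_1 drawing = row_mirror_1_alt drawing := by
  rw [rowA_normal]
  unfold row_mirror_1_alt
  by_cases hc : drawing.tail.contains (drawing.getD 0 "") = true
  · simp only [if_pos hc]
    rw [List.filter_congr (q := fun i =>
        !(i % 2 == 0) && (innerOK drawing i && (drawing.getD i "" == drawing.getD 0 "" && i != 0)))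
      (by
        intro i _
        by_cases h2 : i % 2 = 0
        · simp [h2]
        · have h1 : i % 2 = 1 := by omega
          simp [h1])]
    rw [range_filter_odd, List.filter_map, List.map_map]
    rw [List.filter_congr (q := fun k => drawing.take (2*k) == (drawing.take (2*k)).reverse)
      (by
        intro k hk
        have hm := List.mem_range'_1.mp hk
        have h2k : 2*k ≤ drawing.length := by
          have := hm.2; omega
        simpa using cond_eq drawing k hm.1 h2k)]
    apply List.map_congr_left
    intro k hk
    have hm := List.mem_range'_1.mp (List.mem_of_mem_filter hk)
    simp only [Function.comp]
    congr 1
    omega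
  · simp only [if_neg hc]
    have : (List.range' 1 (drawing.length / 2)).filter
        (fun k => drawing.take (2*k) == (drawing.take (2*k)).reverse) = [] := by
      rw [List.filter_eq_nil_iff]
      intro k hk hcond
      have hm := List.mem_range'_1.mp hk
      have h2k : 2*k ≤ drawing.length := by have := hm.2; omega
      have hp : drawing.take (2*k) = (drawing.take (2*k)).reverse := by
        simpa using hcond
      exact hc (List.contains_iff_mem.mpr (mem_tail_of_pal drawing k hm.1 h2k hp))
    rw [this, List.map_nil]

-- ===== VERDICT (by name: the statement is the Claim_ definition above) =====
theorem row_mirror_1_spec : Claim_equal_row_mirror_1 := by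
  intro drawing _ _
  unfold Spec_row_mirror_1
  exact main_eq drawing
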